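-- pv_equiv track=rewrite | github.com/yesl-kim/algorithm-problem-solving | 프로그래머스/2/17687. ［3차］ n진수 게임/［3차］ n진수 게임.py | solution
-- ===== SOURCE A (Python) =====
-- def solution(n, t, m, p):
--     def convert(n, base):
--         T = "0123456789ABCDEF"
--         q, r = divmod(n, base)
--
--         return convert(q, base) + T[r] if q else T[r]
--
--     words = []
--     dic = {'10': 'A', '11': 'B', '12': 'C', '13': 'D', '14': 'E', '15': 'F'}
--     for i in range(10**7):
--         x = convert(i, n)
--         ws = [dic.get(x, x)] if i < n else list(x)
--         words += ws
--         if len(words) >= m * t + p: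
--             break
--
--
--     speak = words[p - 1::m][:t]
--     return "".join(speak)
-- ===== SOURCE B (Python) =====
-- def solution(n, t, m, p):
--     T = "0123456789ABCDEF"
--     target = m * t + p
--     s = ""
--     for i in range(10**7):
--         digits = []
--         q = i
--         while True:
--             q, r = divmod(q, n)
--             digits.append(T[r])
--             if not q:
--                 break
--         digits.reverse()
--         s += "".join(digits)
--         if len(s) >= target:
--             break
--     return s[p - 1::m][:t]
-- ===== Notes on version B (the rewrite author's own statement) =====
-- stated objective: faster
-- what changed: B computes each base-n representation with an iterative divmod loop (collect remainders, reverse) instead of A's recursive string concatenation, drops the dead `dic` dictionary and the `i < n` special branch, and accumulates one running string instead of A's per-character list of 1-char strings before the identical final slice.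
import Mathlib
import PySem

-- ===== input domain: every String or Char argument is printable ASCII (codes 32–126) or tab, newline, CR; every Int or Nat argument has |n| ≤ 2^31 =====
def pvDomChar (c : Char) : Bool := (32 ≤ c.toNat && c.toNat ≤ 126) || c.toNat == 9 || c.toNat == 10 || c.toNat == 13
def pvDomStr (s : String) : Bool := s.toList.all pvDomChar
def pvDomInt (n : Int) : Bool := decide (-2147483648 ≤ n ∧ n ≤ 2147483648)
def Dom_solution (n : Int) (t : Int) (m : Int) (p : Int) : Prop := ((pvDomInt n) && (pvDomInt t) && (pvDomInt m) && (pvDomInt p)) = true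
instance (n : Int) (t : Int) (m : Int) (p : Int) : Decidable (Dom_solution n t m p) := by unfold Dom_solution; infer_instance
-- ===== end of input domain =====

-- B replaces A's recursive digit helper by an iterative divmod loop and drops the dead `dic`
-- dictionary and the `i < n` branch, appending each representation to one running string
-- (same generate-until-long-enough loop, same final slice).

-- ===== PORT A =====
-- the digit table "0123456789ABCDEF" (as chars; both Pythons index it with T[r])
def pvT : List Char := ['0','1','2','3','4','5','6','7','8','9','A','B','C','D','E','F']

-- A's recursive convert(n, base); fuel totalizes the recursion (128 ≫ any digit count reached
-- inside Pre_); where Python raises (divmod by 0 / T[r] out of range) we return a junk value,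
-- those inputs are outside Pre_solution.
def convertA : Nat → Int → Int → List Char
  | 0, _, _ => []
  | fuel+1, i, base =>
    match PySem.Int.divmod? i base with
    | none => []
    | some (q, r) =>
      let c : Char := (PySem.List.pyGet? pvT r).getD '?'
      if q ≠ 0 then convertA fuel q base ++ [c] else [c]

-- dic = {'10': 'A', …, '15': 'F'}
def pvDic : PySem.Dict String String :=
  PySem.Dict.ofList [("10","A"),("11","B"),("12","C"),("13","D"),("14","E"),("15","F")]

-- the `for i in range(10**7): … break` loop; words is Python's list[str] of 1-char strings
def loopA : Nat → Int → Int → Int → List String → List String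
  | 0, _, _, _, words => words
  | fuel+1, i, n, target, words =>
    let x : List Char := convertA 128 i n
    let ws : List String :=
      if i < n then [pvDic.getD (String.ofList x) (String.ofList x)]
      else x.map (fun c => String.ofList [c])
    let words := words ++ ws
    if (words.length : Int) ≥ target then words
    else loopA fuel (i+1) n target words

def solution (n : Int) (t : Int) (m : Int) (p : Int) : String :=
  let words := loopA 10000000 0 n (m * t + p) []
  let speak := PySem.List.slice ((PySem.List.slice? words (some (p - 1)) none m).getD []) none (some t)
  PySem.Str.join "" speak

-- ===== PORT B =====
-- B's inner `while True: q, r = divmod(q, n); digits.append(T[r]); if not q: break` followed by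
-- `digits.reverse()`; same fuel totalization as A's convert.
def convertB : Nat → Int → Int → List Char → List Char
  | 0, _, _, digits => digits.reverse
  | fuel+1, q, base, digits =>
    match PySem.Int.divmod? q base with
    | none => digits.reverse
    | some (q', r) =>
      let digits := digits ++ [(PySem.List.pyGet? pvT r).getD '?']
      if q' = 0 then digits.reverse else convertB fuel q' base digits

-- B's `for i in range(10**7): s += …; if len(s) >= target: break`; s is the running string (as chars)
def loopB : Nat → Int → Int → Int → List Char → List Char
  | 0, _, _, _, s => s
  | fuel+1, i, n, target, s =>
    let s := s ++ convertB 128 i n []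
    if (s.length : Int) ≥ target then s
    else loopB fuel (i+1) n target s

def solution_alt (n : Int) (t : Int) (m : Int) (p : Int) : String :=
  let s := loopB 10000000 0 n (m * t + p) []
  String.ofList (PySem.List.slice ((PySem.List.slice? s (some (p - 1)) none m).getD []) none (some t))

-- ===== PRECONDITION & SPEC =====
-- Pre_ excludes exactly the inputs where A raises: m = 0 (slice step 0, ValueError), n = 0
-- (ZeroDivisionError), and the bases outside -17..16 \ {-1, 1} where convert hits an index
-- outside the 16-char digit table (IndexError) or recurses forever (RecursionError) — except
-- when the target length m*t+p is small enough that the loop breaks before ever reaching a bad digit.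
def Pre_solution (n : Int) (t : Int) (m : Int) (p : Int) : Prop :=
  m ≠ 0 ∧ n ≠ 0 ∧
    ((2 ≤ n ∧ n ≤ 16) ∨ (-17 ≤ n ∧ n ≤ -2) ∨ m * t + p ≤ 1 ∨ (17 ≤ n ∧ m * t + p ≤ 16))
instance (n : Int) (t : Int) (m : Int) (p : Int) : Decidable (Pre_solution n t m p) := by
  unfold Pre_solution; infer_instance

def pvWitness_solution : Int × Int × Int × Int := (2, 4, 2, 1)

def Spec_solution (n : Int) (t : Int) (m : Int) (p : Int) (out : String) : Prop := out = solution_alt n t m p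
instance (n : Int) (t : Int) (m : Int) (p : Int) (out : String) : Decidable (Spec_solution n t m p out) := by unfold Spec_solution; infer_instance

-- ===== CLAIM (what is proved, stated in full; the proofs are below) =====
def Claim_equal_solution : Prop := ∀ (n : Int) (t : Int) (m : Int) (p : Int), Dom_solution n t m p → Pre_solution n t m p → Spec_solution n t m p (solution n t m p)

-- ===== LEMMAS AND PROOFS =====

-- B's iterative digit loop produces exactly A's recursive convert (plus the accumulator already collected)
theorem convertB_eq (fuel : Nat) : ∀ (q base : Int) (acc : List Char),
    convertB fuel q base acc = convertA fuel q base ++ acc.reverse := by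
  induction fuel with
  | zero => intro q base acc; simp [convertB, convertA]
  | succ fuel ih =>
    intro q base acc
    simp only [convertB, convertA]
    cases PySem.Int.divmod? q base with
    | none => simp
    | some qr =>
      obtain ⟨q', r⟩ := qr
      by_cases hq : q' = 0 <;> simp [hq, ih]

-- a one-character string is never a key of dic (all keys have two characters)
theorem pvDic_getD_single (c : Char) :
    pvDic.getD (String.ofList [c]) (String.ofList [c]) = String.ofList [c] := by
  have h10 : ("10" == String.ofList [c]) = false := by simp [String.ext_iff]
  have h11 : ("11" == String.ofList [c]) = false := by simp [String.ext_iff]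
  have h12 : ("12" == String.ofList [c]) = false := by simp [String.ext_iff]
  have h13 : ("13" == String.ofList [c]) = false := by simp [String.ext_iff]
  have h14 : ("14" == String.ofList [c]) = false := by simp [String.ext_iff]
  have h15 : ("15" == String.ofList [c]) = false := by simp [String.ext_iff]
  simp [pvDic, PySem.Dict.getD, PySem.Dict.get?, PySem.Dict.ofList, PySem.Dict.update,
        PySem.Dict.insert, PySem.Dict.contains, PySem.Dict.empty, List.find?,
        h10, h11, h12, h13, h14, h15]

theorem convertA_small_succ (fuel : Nat) (i n : Int) (h0 : 0 ≤ i) (h : i < n) :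
    convertA (fuel + 1) i n = [(PySem.List.pyGet? pvT i).getD '?'] := by
  have hn : n ≠ 0 := by omega
  have hq : PySem.Int.floordiv i n = 0 :=
    (PySem.Int.floordiv_eq_iff_of_pos (by omega)).2 (by constructor <;> omega)
  have hr : PySem.Int.mod i n = i := by
    have h2 := PySem.Int.floordiv_mul_add_mod i n
    rw [hq] at h2
    simpa using h2
  simp only [PySem.Int.floordiv] at hq
  simp only [PySem.Int.mod] at hr
  simp [convertA, PySem.Int.divmod?, hn, hq, hr]

theorem convertA_small (i n : Int) (h0 : 0 ≤ i) (h : i < n) :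
    convertA 128 i n = [(PySem.List.pyGet? pvT i).getD '?'] := by
  simpa using convertA_small_succ 127 i n h0 h

-- in A's loop each appended chunk is exactly convert(i, n), one 1-char string per character
theorem wsA_eq (i n : Int) (h0 : 0 ≤ i) :
    (if i < n then [pvDic.getD (String.ofList (convertA 128 i n)) (String.ofList (convertA 128 i n))]
     else (convertA 128 i n).map (fun c => String.ofList [c]))
    = (convertA 128 i n).map (fun c => String.ofList [c]) := by
  by_cases h : i < n
  · rw [if_pos h, convertA_small i n h0 h, pvDic_getD_single]
    rfl
  · rw [if_neg h]

-- the two loops run in lockstep: A's word list is B's string, one 1-char string per character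
theorem loop_eq (fuel : Nat) : ∀ (i n target : Int), 0 ≤ i → ∀ (cs : List Char),
    loopA fuel i n target (cs.map (fun c => String.ofList [c]))
      = (loopB fuel i n target cs).map (fun c => String.ofList [c]) := by
  induction fuel with
  | zero => intro i n target _ cs; simp [loopA, loopB]
  | succ fuel ih =>
    intro i n target h0 cs
    simp only [loopA, loopB, convertB_eq, List.reverse_nil, List.append_nil]
    rw [wsA_eq i n h0, ← List.map_append, List.length_map]
    by_cases hb : ((cs ++ convertA 128 i n).length : Int) ≥ target
    · rw [if_pos hb, if_pos hb]
    · rw [if_neg hb, if_neg hb, ih (i+1) n target (by omega)]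

-- list slicing with a step commutes with List.map (sliceIndices only reads the length)
theorem slice?_map {α β : Type} (f : α → β) (cs : List α) (a b : Option Int) (st : Int) :
    PySem.List.slice? (cs.map f) a b st = (PySem.List.slice? cs a b st).map (List.map f) := by
  unfold PySem.List.slice?
  split
  · rfl
  · simp [← List.map_filterMap, List.getElem?_map]

-- plain slicing commutes with List.map
theorem slice_map {α β : Type} (f : α → β) (cs : List α) (b : Option Int) :
    PySem.List.slice (cs.map f) none b = (PySem.List.slice cs none b).map f := by
  unfold PySem.List.slice
  simp

-- joining a list of 1-char strings with "" is the string of its characters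
theorem join_singletons (cs : List Char) :
    PySem.Str.join "" (cs.map (fun c => String.ofList [c])) = String.ofList cs := by
  have h : (cs.map (fun c => String.ofList [c])).map String.toList = cs.map (fun c => [c]) := by
    simp
  simp [PySem.Str.join, h, PySem.Chars.join_nil_singletons]

-- ===== VERDICT (by name: the statement is the Claim_ definition above) =====
theorem solution_spec : Claim_equal_solution := by
  intro n t m p _ _
  unfold Spec_solution solution solution_alt
  have hw : loopA 10000000 0 n (m * t + p) []
      = (loopB 10000000 0 n (m * t + p) []).map (fun c => String.ofList [c]) := by
    simpa using loop_eq 10000000 0 n (m * t + p) le_rfl []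
  show PySem.Str.join "" (PySem.List.slice ((PySem.List.slice? (loopA 10000000 0 n (m * t + p) []) (some (p - 1)) none m).getD []) none (some t))
      = String.ofList (PySem.List.slice ((PySem.List.slice? (loopB 10000000 0 n (m * t + p) []) (some (p - 1)) none m).getD []) none (some t))
  rw [hw, slice?_map]
  have hgd : ((PySem.List.slice? (loopB 10000000 0 n (m * t + p) []) (some (p - 1)) none m).map
        (List.map (fun c => String.ofList [c]))).getD []
      = ((PySem.List.slice? (loopB 10000000 0 n (m * t + p) []) (some (p - 1)) none m).getD []).map
        (fun c => String.ofList [c]) := by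
    cases PySem.List.slice? (loopB 10000000 0 n (m * t + p) []) (some (p - 1)) none m <;> simp
  rw [hgd, slice_map, join_singletons]
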